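-- pv_equiv track=rewrite | github.com/juan-pe/advent2017 | day1/day1.py | count
-- ===== SOURCE A (Python) =====
-- def count(number_list, step=0):
--     first, *tail = number_list
--
--     if len(tail) == step + 1:
--         return int(first) + int(tail[step]) if first == tail[step] else 0
--
--     if first == tail[step]:
--         return int(first) + int(tail[step]) + count(tail, step)
--     else:
--         return count(tail, step)
-- ===== SOURCE B (Python) =====
-- def count(number_list, step=0):
--     first, *tail = number_list   # empty input is an error, as for the original
--     jump = step + 1
--     total = 0
--     d = 0
--     while True:
--         a, b = number_list[d], number_list[d + jump]
--         if a == b: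
--             total += int(a) + int(b)
--         if len(number_list) - d == jump + 1:
--             return total
--         d += 1
-- ===== Notes on version B (the rewrite author's own statement) =====
-- stated objective: faster
-- what changed: Replaces the head-popping recursion (whose 'first, *tail' unpack copies the tail at every level, and whose terminal case is duplicated) by a single iterative index loop with an accumulator and one uniform pair comparison.
import Mathlib
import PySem

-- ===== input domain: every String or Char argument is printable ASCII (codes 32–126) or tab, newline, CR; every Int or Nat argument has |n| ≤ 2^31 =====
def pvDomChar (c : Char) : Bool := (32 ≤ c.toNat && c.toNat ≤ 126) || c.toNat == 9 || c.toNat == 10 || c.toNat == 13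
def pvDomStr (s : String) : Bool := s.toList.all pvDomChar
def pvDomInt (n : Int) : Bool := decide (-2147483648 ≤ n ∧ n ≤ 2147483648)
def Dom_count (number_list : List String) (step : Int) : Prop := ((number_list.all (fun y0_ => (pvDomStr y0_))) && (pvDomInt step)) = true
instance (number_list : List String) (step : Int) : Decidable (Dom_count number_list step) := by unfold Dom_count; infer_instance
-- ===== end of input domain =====

-- B replaces A's head-popping recursion (whose 'first, *tail' unpack copies the tail at every
-- level, and whose terminal case is duplicated) by one iterative index loop with an accumulator
-- and a single uniform pair comparison, intended to be faster. Equivalence of RETURN values.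

-- ===== PORT A =====
-- A raises (ValueError on empty unpack, IndexError on tail[step], ValueError on int())
-- on some inputs; the aux returns none exactly there, and Pre_count excludes those inputs.
def countAux : List String → Int → Option Int
  | [], _ => none  -- 'first, *tail = number_list' raises ValueError on []
  | first :: tail, step =>
    if (tail.length : Int) = step + 1 then
      match PySem.List.pyGet? tail step with
      | none => none
      | some t =>
        if first == t then
          match PySem.Int.ofStr? first, PySem.Int.ofStr? t with
          | some a, some b => some (a + b)
          | _, _ => none
        else some 0
    else
      match PySem.List.pyGet? tail step with
      | none => none
      | some t =>
        if first == t then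
          match PySem.Int.ofStr? first, PySem.Int.ofStr? t, countAux tail step with
          | some a, some b, some r => some (a + b + r)
          | _, _, _ => none
        else countAux tail step

def count (number_list : List String) (step : Int) : Int :=
  (countAux number_list step).getD 0

-- ===== PORT B =====
-- the 'while True' loop of Source B; fuel bounds the iteration count (the loop either returns or
-- raises within len(number_list)+1 steps); none = the loop body raises (IndexError/ValueError)
def altStep (nl : List String) (jump : Int) : Nat → Int → Int → Option Int
  | 0, _, _ => none
  | fuel + 1, d, total =>
    match PySem.List.pyGet? nl d, PySem.List.pyGet? nl (d + jump) with
    | some a, some b =>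
      (match (if a == b then
                match PySem.Int.ofStr? a, PySem.Int.ofStr? b with
                | some x, some y => some (total + x + y)
                | _, _ => none
              else some total) with
       | none => none
       | some t => if (nl.length : Int) - d = jump + 1 then some t else altStep nl jump fuel (d + 1) t)
    | _, _ => none

def count_alt (number_list : List String) (step : Int) : Int :=
  match number_list with
  | [] => 0  -- 'first, *tail = number_list' raises ValueError here (outside Pre_count)
  | _ :: _ => (altStep number_list (step + 1) (number_list.length + 1) 0 0).getD 0

-- ===== PRECONDITION & SPEC =====
-- Pre_count = exactly the inputs on which A returns: nonnegative step, at least step+2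
-- elements (else ValueError/IndexError), and every equal pair (step+1) apart parses as an
-- int (else ValueError).
def Pre_count (number_list : List String) (step : Int) : Prop :=
  0 ≤ step ∧ step + 2 ≤ number_list.length ∧
  ∀ i < number_list.length, i + step.toNat + 1 < number_list.length →
    number_list.getD i "" = number_list.getD (i + step.toNat + 1) "" →
    (PySem.Int.ofStr? (number_list.getD i "")).isSome = true
instance (number_list : List String) (step : Int) : Decidable (Pre_count number_list step) := by
  unfold Pre_count; infer_instance

def pvWitness_count : List String × Int := (["1", "1", "2"], 0)

def Spec_count (number_list : List String) (step : Int) (out : Int) : Prop := out = count_alt number_list step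
instance (number_list : List String) (step : Int) (out : Int) : Decidable (Spec_count number_list step out) := by unfold Spec_count; infer_instance

-- ===== CLAIM (what is proved, stated in full; the proofs are below) =====
def Claim_equal_count : Prop := ∀ (number_list : List String) (step : Int), Dom_count number_list step → Pre_count number_list step → Spec_count number_list step (count number_list step)

-- ===== LEMMAS AND PROOFS =====

-- A's recursion on the k-th suffix and B's loop at index k produce the same contribution
lemma loop_eq (nl : List String) (step : Int) (hs : 0 ≤ step)
    (hparse : ∀ i < nl.length, i + step.toNat + 1 < nl.length →
      nl.getD i "" = nl.getD (i + step.toNat + 1) "" →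
      (PySem.Int.ofStr? (nl.getD i "")).isSome = true) :
    ∀ (fuel k : Nat) (t : Int),
      k + step.toNat + 2 ≤ nl.length →
      nl.length - k ≤ fuel →
      ∃ r, countAux (nl.drop k) step = some r ∧
        altStep nl (step + 1) fuel (k : Int) t = some (t + r) := by
  intro fuel
  induction fuel with
  | zero => intro k t hk hf; omega
  | succ fuel ih =>
      intro k t hk hf
      have hkn : k < nl.length := by omega
      have hk2 : k + step.toNat + 1 < nl.length := by omega
      -- the suffix A recurses on
      have hdrop : nl.drop k = nl[k] :: nl.drop (k + 1) :=
        List.drop_eq_getElem_cons hkn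
      -- both sides look at the pair (nl[k], nl[k + step + 1])
      have hb_idx : (k : Int) + (step + 1) = ((k + step.toNat + 1 : Nat) : Int) := by
        push_cast; omega
      have hgetA : PySem.List.pyGet? nl (k : Int) = some nl[k] := by
        rw [PySem.List.pyGet?_natCast, List.getElem?_eq_getElem hkn]
      have hgetB : PySem.List.pyGet? nl ((k : Int) + (step + 1)) = some nl[k + step.toNat + 1] := by
        rw [hb_idx, PySem.List.pyGet?_natCast, List.getElem?_eq_getElem hk2]
      -- A's tail[step] is the same element
      have htlen : (nl.drop (k + 1)).length = nl.length - (k + 1) := by simp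
      have hst : step.toNat < (nl.drop (k + 1)).length := by omega
      have hgetT : PySem.List.pyGet? (nl.drop (k + 1)) step
          = some nl[k + step.toNat + 1] := by
        rw [PySem.List.pyGet?_eq_some_getElem _ hs (by omega)]
        congr 1
        rw [List.getElem_drop]
        congr 1
        omega
      have hDa : nl.getD k "" = nl[k] := List.getD_eq_getElem nl "" hkn
      have hDb : nl.getD (k + step.toNat + 1) "" = nl[k + step.toNat + 1] :=
        List.getD_eq_getElem nl "" hk2
      by_cases heq : nl[k] = nl[k + step.toNat + 1]
      · -- equal pair: it parses
        have hpk := hparse k hkn hk2 (by rw [hDa, hDb]; exact heq)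
        rw [hDa] at hpk
        obtain ⟨x, hx⟩ := Option.isSome_iff_exists.mp hpk
        have hx' : PySem.Int.ofStr? nl[k + step.toNat + 1] = some x := by rw [← heq]; exact hx
        by_cases hbase : nl.length - k = step.toNat + 2
        · -- terminal pair
          have hA : countAux (nl.drop k) step = some (x + x) := by
            rw [hdrop]
            unfold countAux
            rw [if_pos (by omega), hgetT]
            simp [heq, hx']
          refine ⟨x + x, hA, ?_⟩
          unfold altStep
          rw [hgetA, hgetB]
          simp only [heq, beq_self_eq_true, if_true, hx']
          rw [if_pos (by omega)]
          congr 1; omega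
        · -- inner pair: recurse / iterate
          obtain ⟨r, hA, hB⟩ := ih (k + 1) (t + x + x) (by omega) (by omega)
          have hA' : countAux (nl.drop k) step = some (x + x + r) := by
            rw [hdrop]
            unfold countAux
            rw [if_neg (by omega), hgetT]
            simp [heq, hx', hA]
          refine ⟨x + x + r, hA', ?_⟩
          unfold altStep
          rw [hgetA, hgetB]
          simp only [heq, beq_self_eq_true, if_true, hx']
          rw [if_neg (by omega)]
          have : ((k : Int) + 1) = (((k + 1 : Nat)) : Int) := by omega
          rw [this, hB]
          congr 1; omega
      · -- unequal pair: no contribution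
        by_cases hbase : nl.length - k = step.toNat + 2
        · have hA : countAux (nl.drop k) step = some 0 := by
            rw [hdrop]
            unfold countAux
            rw [if_pos (by omega), hgetT]
            simp [heq]
          refine ⟨0, hA, ?_⟩
          unfold altStep
          rw [hgetA, hgetB]
          simp only [beq_iff_eq, heq, if_false]
          rw [if_pos (by omega)]
          congr 1; omega
        · obtain ⟨r, hA, hB⟩ := ih (k + 1) t (by omega) (by omega)
          have hA' : countAux (nl.drop k) step = some r := by
            rw [hdrop]
            unfold countAux
            rw [if_neg (by omega), hgetT]
            simp [heq, hA]
          refine ⟨r, hA', ?_⟩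
          unfold altStep
          rw [hgetA, hgetB]
          simp only [beq_iff_eq, heq, if_false]
          rw [if_neg (by omega)]
          have : ((k : Int) + 1) = (((k + 1 : Nat)) : Int) := by omega
          rw [this, hB]

-- ===== VERDICT (by name: the statement is the Claim_ definition above) =====
theorem count_spec : Claim_equal_count := by
  intro number_list step _ hpre
  obtain ⟨hs, hlen, hparse⟩ := hpre
  obtain ⟨r, hA, hB⟩ := loop_eq number_list step hs hparse (number_list.length + 1) 0 0
    (by omega) (by omega)
  cases number_list with
  | nil => simp at hlen; omega
  | cons x xs =>
    rw [List.drop_zero] at hA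
    rw [Nat.cast_zero] at hB
    have hAlt : count_alt (x :: xs) step
        = (altStep (x :: xs) (step + 1) ((x :: xs).length + 1) 0 0).getD 0 := rfl
    unfold Spec_count count
    rw [hA, hAlt, hB]
    simp
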